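-- pv_equiv track=rewrite | github.com/UltravioletaDAO/karmakadabra | services/task_executor.py | _detect_steps
-- ===== SOURCE A (Python) =====
-- def _detect_steps(instructions: str) -> list[str]:
--     """Detect distinct steps in task instructions."""
--     lines = instructions.strip().splitlines()
--     steps: list[str] = []
--     current_step: list[str] = []
--
--     for line in lines:
--         stripped = line.strip()
--         # Detect numbered steps or bullet points indicating new steps
--         if (
--             stripped
--             and (
--                 stripped[0].isdigit() and (stripped[1:2] in (".", ")", ":"))
--                 or stripped.startswith("- Step")
--                 or stripped.startswith("## ")
--             )
--         ):
--             if current_step: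
--                 steps.append(" ".join(current_step))
--             current_step = [stripped.lstrip("0123456789.)-: #")]
--         elif stripped:
--             current_step.append(stripped)
--
--     if current_step:
--         steps.append(" ".join(current_step))
--
--     return steps
-- ===== SOURCE B (Python) =====
-- def _detect_steps(instructions: str) -> list[str]:
--     """Detect distinct steps in task instructions (recursive segmentation)."""
--     marker_lead = "0123456789.)-: #"
--
--     def is_marker(s: str) -> bool:
--         return bool(
--             s
--             and (
--                 s[0].isdigit() and s[1:2] in (".", ")", ":")
--                 or s.startswith("- Step")
--                 or s.startswith("## ")
--             )
--         )
--
--     def lead(s: str) -> str: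
--         return s.lstrip(marker_lead)
--
--     def segments(first: list[str], rest: list[str]) -> list[str]:
--         # body = longest non-marker prefix of rest; it completes the open segment
--         i = 0
--         while i < len(rest) and not is_marker(rest[i]):
--             i += 1
--         step = " ".join(first + rest[:i])
--         if i == len(rest):
--             return [step]
--         return [step] + segments([lead(rest[i])], rest[i + 1:])
--
--     L = [s for s in (ln.strip() for ln in instructions.strip().splitlines()) if s]
--     if not L:
--         return []
--     if is_marker(L[0]):
--         return segments([lead(L[0])], L[1:])
--     return segments([L[0]], L[1:])
-- ===== Notes on version B (the rewrite author's own statement) =====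
-- stated objective: alternative
-- what changed: A's single accumulator loop with a conditional flush is replaced by first reducing the input to the list of non-empty stripped lines and then recursively slicing it into segments at marker lines (span/takeWhile decomposition), joining each segment once.
import Mathlib
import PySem

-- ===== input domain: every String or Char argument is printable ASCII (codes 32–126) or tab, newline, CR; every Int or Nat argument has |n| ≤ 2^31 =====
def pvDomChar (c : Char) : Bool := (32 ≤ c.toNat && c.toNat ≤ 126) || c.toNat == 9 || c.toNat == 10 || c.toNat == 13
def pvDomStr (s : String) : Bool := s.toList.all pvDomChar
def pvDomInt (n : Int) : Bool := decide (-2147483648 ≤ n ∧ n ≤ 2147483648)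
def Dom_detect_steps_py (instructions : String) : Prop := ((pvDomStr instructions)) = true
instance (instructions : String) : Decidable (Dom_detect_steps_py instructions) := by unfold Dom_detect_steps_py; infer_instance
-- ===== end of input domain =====

-- B replaces A's accumulator loop with a recursive span-based segmentation of the
-- non-empty stripped lines (alternative decomposition, same cost).

-- ===== PORT A =====
-- A's new-step test: `stripped and (stripped[0].isdigit() and stripped[1:2] in (".",")",":")
--   or stripped.startswith("- Step") or stripped.startswith("## "))`
def aMarker (s : String) : Bool :=
  !s.toList.isEmpty &&
    ((PySem.Chars.isdigit (s.toList.headD ' ') &&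
        (PySem.List.slice s.toList (some 1) (some 2) == ['.'] ||
         PySem.List.slice s.toList (some 1) (some 2) == [')'] ||
         PySem.List.slice s.toList (some 1) (some 2) == [':'])) ||
     PySem.Str.startswith s "- Step" ||
     PySem.Str.startswith s "## ")

-- exact port of str.lstrip("0123456789.)-: #"): drop leading chars of that set
def aLead (s : String) : String :=
  String.ofList (s.toList.dropWhile (fun c => ("0123456789.)-: #".toList).contains c))

-- A's loop body on the already-stripped line (branches in A's order)
def gA (acc : List String × List String) (stripped : String) : List String × List String :=
  if aMarker stripped then
    ((if acc.2 ≠ [] then acc.1 ++ [PySem.Str.join " " acc.2] else acc.1), [aLead stripped])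
  else if !stripped.toList.isEmpty then (acc.1, acc.2 ++ [stripped])
  else acc

def detect_steps_py (instructions : String) : List String :=
  let lines := PySem.Str.splitlines (PySem.Str.strip instructions)
  let r := lines.foldl (fun acc line => gA acc (PySem.Str.strip line)) ([], [])
  if r.2 ≠ [] then r.1 ++ [PySem.Str.join " " r.2] else r.1

-- ===== PORT B =====
def bIsMarker (s : String) : Bool :=
  match s.toList with
  | [] => false
  | c :: _ =>
    (PySem.Chars.isdigit c &&
       (PySem.List.slice s.toList (some 1) (some 2) == ['.'] ||
        PySem.List.slice s.toList (some 1) (some 2) == [')'] ||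
        PySem.List.slice s.toList (some 1) (some 2) == [':'])) ||
    PySem.Str.startswith s "- Step" ||
    PySem.Str.startswith s "## "

-- exact port of str.lstrip("0123456789.)-: #")
def bLead (s : String) : String :=
  String.ofList (s.toList.dropWhile (fun c => ("0123456789.)-: #".toList).contains c))

-- Source B's `segments`: the while loop computing the non-marker prefix of `rest` is the
-- span (takeWhile / dropWhile) at (fun s => !bIsMarker s)
def bSegments (first rest : List String) : List String :=
  match h : rest.dropWhile (fun s => !bIsMarker s) with
  | [] => [PySem.Str.join " " (first ++ rest.takeWhile (fun s => !bIsMarker s))]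
  | m :: ms =>
    PySem.Str.join " " (first ++ rest.takeWhile (fun s => !bIsMarker s)) ::
      bSegments [bLead m] ms
termination_by rest.length
decreasing_by
  have h1 := List.length_dropWhile_le (fun s => !bIsMarker s) rest
  rw [h] at h1; simp at h1; omega

def detect_steps_py_alt (instructions : String) : List String :=
  let L := ((PySem.Str.splitlines (PySem.Str.strip instructions)).map PySem.Str.strip).filter
      (fun s => !s.toList.isEmpty)
  match L with
  | [] => []
  | l0 :: rest => if bIsMarker l0 then bSegments [bLead l0] rest else bSegments [l0] rest

-- ===== PRECONDITION & SPEC =====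
def Spec_detect_steps_py (instructions : String) (out : List String) : Prop := out = detect_steps_py_alt instructions
instance (instructions : String) (out : List String) : Decidable (Spec_detect_steps_py instructions out) := by unfold Spec_detect_steps_py; infer_instance

-- ===== CLAIM (what is proved, stated in full; the proofs are below) =====
def Claim_equal_detect_steps_py : Prop := ∀ (instructions : String), Dom_detect_steps_py instructions → Spec_detect_steps_py instructions (detect_steps_py instructions)

-- ===== LEMMAS AND PROOFS =====

lemma marker_eq (s : String) : aMarker s = bIsMarker s := by
  unfold aMarker bIsMarker
  cases h : s.toList <;> simp [h]

lemma lead_eq (s : String) : aLead s = bLead s := rfl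

-- the closing `if current_step: steps.append(...)` of A
def finishA (r : List String × List String) : List String :=
  if r.2 ≠ [] then r.1 ++ [PySem.Str.join " " r.2] else r.1

lemma gA_empty (acc : List String × List String) (s : String) (h : s.toList = []) :
    gA acc s = acc := by
  simp [gA, aMarker, h]

lemma foldl_gA_filter (l : List String) (acc : List String × List String) :
    l.foldl gA acc = (l.filter (fun s => !s.toList.isEmpty)).foldl gA acc := by
  induction l generalizing acc with
  | nil => rfl
  | cons s t ih =>
    by_cases h : s.toList = []
    · simp [h, gA_empty acc s h, ih]
    · simp [h, ih]

lemma bSegments_nil (first : List String) :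
    bSegments first [] = [PySem.Str.join " " first] := by
  rw [bSegments]; simp

lemma bSegments_marker (first : List String) (s : String) (t : List String)
    (h : bIsMarker s = true) :
    bSegments first (s :: t) = PySem.Str.join " " first :: bSegments [bLead s] t := by
  have hp : List.dropWhile (fun x => !bIsMarker x) (s :: t) = s :: t :=
    List.dropWhile_cons_of_neg (by simp [h])
  have hq : List.takeWhile (fun x => !bIsMarker x) (s :: t) = [] :=
    List.takeWhile_cons_of_neg (by simp [h])
  rw [bSegments]
  split
  · rename_i heq; rw [hp] at heq; cases heq
  · rename_i m ms heq
    rw [hp] at heq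
    cases heq
    rw [hq]
    simp

lemma bSegments_skip (first : List String) (s : String) (t : List String)
    (h : bIsMarker s = false) :
    bSegments first (s :: t) = bSegments (first ++ [s]) t := by
  have hp : List.dropWhile (fun x => !bIsMarker x) (s :: t) =
      List.dropWhile (fun x => !bIsMarker x) t :=
    List.dropWhile_cons_of_pos (by simp [h])
  have hq : List.takeWhile (fun x => !bIsMarker x) (s :: t) =
      s :: List.takeWhile (fun x => !bIsMarker x) t :=
    List.takeWhile_cons_of_pos (by simp [h])
  rw [bSegments, bSegments]
  split
  · rename_i heq
    rw [hp] at heq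
    split
    · rw [hq]; simp
    · rename_i m ms heq2; rw [heq] at heq2; cases heq2
  · rename_i m ms heq
    rw [hp] at heq
    split
    · rename_i heq2; rw [heq] at heq2; cases heq2
    · rename_i m2 ms2 heq2
      rw [heq] at heq2
      cases heq2
      rw [hq]
      simp

lemma loop_eq (L : List String) (steps cur : List String)
    (hcur : cur ≠ []) (hL : ∀ s ∈ L, s.toList ≠ []) :
    finishA (L.foldl gA (steps, cur)) = steps ++ bSegments cur L := by
  induction L generalizing steps cur with
  | nil => simp [finishA, hcur, bSegments_nil]
  | cons s t ih =>
    have hs : s.toList ≠ [] := hL s (by simp)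
    have ht : ∀ x ∈ t, x.toList ≠ [] := fun x hx => hL x (by simp [hx])
    by_cases hm : bIsMarker s
    · have hgA : gA (steps, cur) s =
          (steps ++ [PySem.Str.join " " cur], [aLead s]) := by
        simp [gA, marker_eq, hm, hcur]
      rw [List.foldl_cons, hgA, ih _ _ (by simp) ht, bSegments_marker _ _ _ hm, lead_eq]
      simp
    · have hgA : gA (steps, cur) s = (steps, cur ++ [s]) := by
        simp [gA, marker_eq, hm, hs]
      rw [List.foldl_cons, hgA, ih _ _ (by simp) ht,
        bSegments_skip _ _ _ (by simp [hm])]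

lemma detectA_eq (instructions : String) :
    detect_steps_py instructions =
      finishA ((((PySem.Str.splitlines (PySem.Str.strip instructions)).map PySem.Str.strip).filter
        (fun s => !s.toList.isEmpty)).foldl gA ([], [])) := by
  unfold detect_steps_py finishA
  dsimp only
  rw [← List.foldl_map, foldl_gA_filter]

-- ===== VERDICT (by name: the statement is the Claim_ definition above) =====
theorem detect_steps_py_spec : Claim_equal_detect_steps_py := by
  intro instructions _
  unfold Spec_detect_steps_py detect_steps_py_alt
  rw [detectA_eq]
  dsimp only
  cases hcase : ((PySem.Str.splitlines (PySem.Str.strip instructions)).map PySem.Str.strip).filter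
      (fun s => !s.toList.isEmpty) with
  | nil => simp [finishA]
  | cons l0 rest =>
    have hl0 : l0.toList ≠ [] := by
      have hmem : l0 ∈ ((PySem.Str.splitlines (PySem.Str.strip instructions)).map
          PySem.Str.strip).filter (fun s => !s.toList.isEmpty) := by rw [hcase]; simp
      simpa using List.of_mem_filter hmem
    have hrest : ∀ x ∈ rest, x.toList ≠ [] := by
      intro x hx
      have hmem : x ∈ ((PySem.Str.splitlines (PySem.Str.strip instructions)).map
          PySem.Str.strip).filter (fun s => !s.toList.isEmpty) := by rw [hcase]; simp [hx]
      simpa using List.of_mem_filter hmem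
    by_cases hm : bIsMarker l0
    · rw [List.foldl_cons, show gA ([], []) l0 = ([], [aLead l0]) from by simp [gA, marker_eq, hm],
        loop_eq rest [] [aLead l0] (by simp) hrest, lead_eq]
      simp [hm]
    · rw [List.foldl_cons, show gA ([], []) l0 = ([], [l0]) from by simp [gA, marker_eq, hm, hl0],
        loop_eq rest [] [l0] (by simp) hrest]
      simp [hm]
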